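-- pv_equiv track=rewrite | github.com/FilipeBeserraMaia/cut_stock_problem_algorithms | best_improvement.py | search
-- ===== SOURCE A (Python) =====
-- from copy import deepcopy
--
-- def search(solution, bar_size):
--     cost = get_cost(solution, bar_size)
--     current_cost = (float('+inf'), float('+inf'))
--
--     for b in range(len(solution)):
--         bar = solution[b]
--         sub_solution = deepcopy(solution[b + 1:])
--
--         for it in range(len(bar)):
--             item = bar[it]
--
--             for b_aux in range(len(sub_solution)):
--                 if sum(sub_solution[b_aux]) + item <= bar_size:
--                     sub_solution[b_aux].append(item)
--                     break
--             else:
--                 break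
--         else:
--             solution = solution[:b] + sub_solution
--             break
--
--     return solution
--
--     # for _ in range(amt_trade):
--     #     count = 0
--     #     while not (current_cost[1] < cost[1] and current_cost[0] <= cost[0]):
--     #
--     #         if count > 1000:
--     #             return solutions
--     #
--     #         current_solution = permutation(solution, bar_size)
--     #         current_solution = fill_bar(current_solution, bar_size)
--     #         current_cost = get_cost(current_solution, bar_size)
--     #         count += 1
--     #
--     #     solutions.append(current_solution)
--
--     return solutions
--
-- def get_cost(solution: list, limitt: int) -> int:
--     sums = []
--     for s in solution:
--         rest = limitt - sum(s)
--         if s and (rest > 0):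
--             sums.append(rest)
--
--     return sum(sums), len(sums)
-- ===== SOURCE B (Python) =====
-- def search(solution, bar_size):
--     # Bar-centric sieve: each later bar makes one pass over the item stream,
--     # keeping the items that fit and handing the rest on to the next bar.
--     # (Equivalent to item-order first-fit: a bar's decision on an item depends
--     # only on the earlier items that bar kept.)
--     for b in range(len(solution)):
--         items = solution[b]
--         filled = []
--         for bar in solution[b + 1:]:
--             load = sum(bar)
--             taken, rest = [], []
--             for item in items:
--                 if load + item <= bar_size:
--                     taken.append(item)
--                     load += item
--                 else:
--                     rest.append(item)
--             filled.append(bar + taken)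
--             items = rest
--         if not items:
--             return solution[:b] + filled
--     return solution
-- ===== Notes on version B (the rewrite author's own statement) =====
-- stated objective: alternative
-- what changed: B swaps the traversal order: instead of A's item-outer first-fit (each item scans later bars, re-summing each candidate bar), each later bar makes one pass over the item stream, keeping what fits under a running load and handing the rejects to the next bar; a bar's decision on an item depends only on earlier items it kept, so the sieve equals first-fit.
import Mathlib
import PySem

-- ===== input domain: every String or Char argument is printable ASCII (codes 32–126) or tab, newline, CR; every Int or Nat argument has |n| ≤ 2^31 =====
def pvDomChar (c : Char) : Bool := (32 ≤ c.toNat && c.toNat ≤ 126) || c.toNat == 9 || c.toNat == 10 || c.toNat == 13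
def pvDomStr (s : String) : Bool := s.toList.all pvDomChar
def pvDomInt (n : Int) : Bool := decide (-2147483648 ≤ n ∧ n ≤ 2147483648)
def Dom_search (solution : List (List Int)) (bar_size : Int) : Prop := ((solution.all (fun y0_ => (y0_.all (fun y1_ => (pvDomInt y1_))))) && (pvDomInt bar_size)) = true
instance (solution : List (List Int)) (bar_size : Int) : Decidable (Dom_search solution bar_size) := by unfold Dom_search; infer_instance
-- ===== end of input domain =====

-- B replaces A's item-outer first-fit with a bar-centric sieve (each later bar
-- filters the item stream once); alternative decomposition, same return value.


-- ===== PORT A =====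
-- (A also computes `cost = get_cost(solution, bar_size)` and a float-infinity
--  `current_cost`; both are dead code never read afterwards, so they are not ported.)

-- inner `for b_aux ...: if sum(sub_solution[b_aux]) + item <= bar_size: append; break / else: break`
def placeItemA (bar_size item : Int) : List (List Int) → Option (List (List Int))
  | [] => none
  | bar :: rest =>
    if bar.sum + item ≤ bar_size then some ((bar ++ [item]) :: rest)
    else (placeItemA bar_size item rest).map (bar :: ·)

-- middle `for it in range(len(bar))` with for-else
def placeAllA (bar_size : Int) : List Int → List (List Int) → Option (List (List Int))
  | [], sub => some sub
  | item :: rest, sub =>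
    match placeItemA bar_size item sub with
    | some sub' => placeAllA bar_size rest sub'
    | none => none

-- outer `for b in range(len(solution))`: bars is solution[b:]
def searchGoA (solution : List (List Int)) (bar_size : Int) : List (List Int) → Nat → List (List Int)
  | [], _ => solution
  | bar :: rest, b =>
    match placeAllA bar_size bar (solution.drop (b + 1)) with
    | some sub => solution.take b ++ sub
    | none => searchGoA solution bar_size rest (b + 1)

def search (solution : List (List Int)) (bar_size : Int) : List (List Int) :=
  searchGoA solution bar_size solution 0

-- ===== PORT B =====
-- inner `for item in items: if load+item<=bar_size: taken.append; load+=item else: rest.append`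
def fillBarLoopB (bar_size : Int) : List Int → Int → List Int → List Int → (List Int × List Int)
  | [], _, taken, rest => (taken, rest)
  | i :: is, load, taken, rest =>
    if load + i ≤ bar_size then fillBarLoopB bar_size is (load + i) (taken ++ [i]) rest
    else fillBarLoopB bar_size is load taken (rest ++ [i])

-- middle `for bar in solution[b+1:]: ...; filled.append(bar + taken); items = rest`
def sieveLoopB (bar_size : Int) : List (List Int) → List Int → List (List Int) → (List (List Int) × List Int)
  | [], items, filled => (filled, items)
  | bar :: bars, items, filled =>
    let p := fillBarLoopB bar_size items bar.sum [] []
    sieveLoopB bar_size bars p.2 (filled ++ [bar ++ p.1])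

-- outer `for b in range(len(solution))`: bars is solution[b:]
def searchGoB (solution : List (List Int)) (bar_size : Int) : List (List Int) → Nat → List (List Int)
  | [], _ => solution
  | bar :: rest, b =>
    let p := sieveLoopB bar_size (solution.drop (b + 1)) bar []
    if p.2 = [] then solution.take b ++ p.1
    else searchGoB solution bar_size rest (b + 1)

def search_alt (solution : List (List Int)) (bar_size : Int) : List (List Int) :=
  searchGoB solution bar_size solution 0

-- ===== PRECONDITION & SPEC =====
def Spec_search (solution : List (List Int)) (bar_size : Int) (out : List (List Int)) : Prop := out = search_alt solution bar_size
instance (solution : List (List Int)) (bar_size : Int) (out : List (List Int)) : Decidable (Spec_search solution bar_size out) := by unfold Spec_search; infer_instance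

-- ===== CLAIM (what is proved, stated in full; the proofs are below) =====
def Claim_equal_search : Prop := ∀ (solution : List (List Int)) (bar_size : Int), Dom_search solution bar_size → Spec_search solution bar_size (search solution bar_size)

-- ===== LEMMAS AND PROOFS =====

-- accumulator-free versions of B's two inner loops, for the induction
def fillBarP (bar_size load : Int) : List Int → List Int × List Int
  | [] => ([], [])
  | i :: is =>
    if load + i ≤ bar_size then
      let p := fillBarP bar_size (load + i) is; (i :: p.1, p.2)
    else
      let p := fillBarP bar_size load is; (p.1, i :: p.2)

def sieveP (bar_size : Int) : List Int → List (List Int) → List (List Int) × List Int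
  | items, [] => ([], items)
  | items, bar :: bars =>
    let p := fillBarP bar_size bar.sum items
    let q := sieveP bar_size p.2 bars
    ((bar ++ p.1) :: q.1, q.2)

theorem fillBarLoopB_eq (bar_size : Int) (items : List Int) (load : Int) (taken rest : List Int) :
    fillBarLoopB bar_size items load taken rest =
      (taken ++ (fillBarP bar_size load items).1, rest ++ (fillBarP bar_size load items).2) := by
  induction items generalizing load taken rest with
  | nil => simp [fillBarLoopB, fillBarP]
  | cons i is ih =>
    simp only [fillBarLoopB, fillBarP]
    by_cases h : load + i ≤ bar_size <;> simp [h, ih]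

theorem sieveLoopB_eq (bar_size : Int) (bars : List (List Int)) (items : List Int) (filled : List (List Int)) :
    sieveLoopB bar_size bars items filled =
      (filled ++ (sieveP bar_size items bars).1, (sieveP bar_size items bars).2) := by
  induction bars generalizing items filled with
  | nil => simp [sieveLoopB, sieveP]
  | cons bar bars ih =>
    simp [sieveLoopB, sieveP, fillBarLoopB_eq, ih]

-- A's item-outer first-fit into bar::rest = bar keeps fillBarP's taken items,
-- the rejected stream is first-fit into rest
theorem placeAllA_cons (bar_size : Int) (items : List Int) (bar : List Int) (rest : List (List Int)) :
    placeAllA bar_size items (bar :: rest) =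
      (placeAllA bar_size (fillBarP bar_size bar.sum items).2 rest).map
        (fun out => (bar ++ (fillBarP bar_size bar.sum items).1) :: out) := by
  induction items generalizing bar rest with
  | nil => simp [placeAllA, fillBarP]
  | cons item is ih =>
    simp only [placeAllA, placeItemA, fillBarP]
    by_cases h : bar.sum + item ≤ bar_size
    · have hsum : (bar ++ [item]).sum = bar.sum + item := by simp
      have := ih (bar ++ [item]) rest
      rw [hsum] at this
      simp [h, this]
    · simp only [h, if_false]
      cases hp : placeItemA bar_size item rest with
      | none => simp [placeAllA, hp]
      | some rest' =>
        simp only [Option.map_some]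
        rw [ih bar rest']
        simp [placeAllA, hp]

theorem placeAllA_eq_sieveP (bar_size : Int) (items : List Int) (sub : List (List Int)) :
    placeAllA bar_size items sub =
      if (sieveP bar_size items sub).2 = [] then some (sieveP bar_size items sub).1 else none := by
  induction sub generalizing items with
  | nil =>
    cases items with
    | nil => simp [placeAllA, sieveP]
    | cons i is => simp [placeAllA, placeItemA, sieveP]
  | cons bar bars ih =>
    rw [placeAllA_cons, ih]
    simp only [sieveP]
    by_cases h : (sieveP bar_size (fillBarP bar_size bar.sum items).2 bars).2 = [] <;> simp [h]

theorem searchGo_eq (solution : List (List Int)) (bar_size : Int)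
    (bars : List (List Int)) (b : Nat) :
    searchGoA solution bar_size bars b = searchGoB solution bar_size bars b := by
  induction bars generalizing b with
  | nil => rfl
  | cons bar rest ih =>
    simp only [searchGoA, searchGoB, placeAllA_eq_sieveP, sieveLoopB_eq, List.nil_append]
    by_cases h : (sieveP bar_size bar (solution.drop (b + 1))).2 = []
    · simp [h]
    · simp [h, ih (b + 1)]

-- ===== VERDICT (by name: the statement is the Claim_ definition above) =====
theorem search_spec : Claim_equal_search := by
  intro solution bar_size _
  unfold Spec_search search search_alt
  exact searchGo_eq solution bar_size solution 0
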